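-- pv_equiv track=rewrite | github.com/svetoslav996/prog_fund | 03_Lists_Basics_Exam/05_Faro_Shuffle.py | faro_shuffle
-- ===== SOURCE A (Python) =====
-- def faro_shuffle(deck, num_shuffles):
--     # Split the deck into two halves
--     middle = len(deck) // 2
--     first_half = deck[:middle]
--     second_half = deck[middle:]
--
--     # Perform faro shuffle for the specified number of times
--     for _ in range(num_shuffles):
--         shuffled_deck = []
--         for card1, card2 in zip(first_half, second_half):
--             shuffled_deck.append(card1)
--             shuffled_deck.append(card2)
--
--         # Update halves for the next iteration
--         first_half = shuffled_deck[:middle]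
--         second_half = shuffled_deck[middle:]
--
--     return shuffled_deck
-- ===== SOURCE B (Python) =====
-- def faro_shuffle(deck, num_shuffles):
--     # Closed form: one faro shuffle on the even core of length n sends position i
--     # to 2*i mod (n-1) (last position fixed), so k shuffles send it to i * 2^k mod (n-1).
--     n = 2 * (len(deck) // 2)
--     if n == 0:
--         return []
--     core = deck[:n]
--     m = n - 1
--     e = pow(2, num_shuffles, m)
--     out = [None] * n
--     for i in range(m):
--         out[i * e % m] = core[i]
--     out[m] = core[m]
--     return out
-- ===== Notes on version B (the rewrite author's own statement) =====
-- stated objective: faster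
-- what changed: Instead of materialising the interleaved deck num_shuffles times, B computes the faro permutation in closed form (position i goes to i*2^k mod (n-1) on the even core, last card fixed) using modular exponentiation, and scatters the deck once.
import Mathlib
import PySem

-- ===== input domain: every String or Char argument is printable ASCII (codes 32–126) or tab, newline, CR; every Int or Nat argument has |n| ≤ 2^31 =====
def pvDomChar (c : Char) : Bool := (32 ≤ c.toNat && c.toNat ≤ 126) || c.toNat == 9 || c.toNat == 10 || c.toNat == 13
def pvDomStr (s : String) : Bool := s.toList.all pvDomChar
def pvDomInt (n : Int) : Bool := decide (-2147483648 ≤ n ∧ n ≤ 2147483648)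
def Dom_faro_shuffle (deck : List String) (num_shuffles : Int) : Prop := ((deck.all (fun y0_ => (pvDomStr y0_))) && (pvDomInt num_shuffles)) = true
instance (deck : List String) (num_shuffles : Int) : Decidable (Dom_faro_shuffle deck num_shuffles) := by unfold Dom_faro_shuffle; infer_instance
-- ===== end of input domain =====

-- B replaces A's repeated interleaving passes by the closed-form faro permutation
-- (position i of the even core goes to i*2^k mod (n-1), last card fixed), computed with
-- modular exponentiation and one scatter pass (objective: faster).

-- ===== PORT A =====
def faro_shuffle (deck : List String) (num_shuffles : Int) : List String :=
  -- middle = len(deck) // 2  (len is nonnegative, so Python '//' is Nat division here)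
  let middle : Nat := deck.length / 2
  let first_half := PySem.List.slice deck none (some (middle : Int))
  let second_half := PySem.List.slice deck (some (middle : Int)) none
  -- for _ in range(num_shuffles): … (loop counter unused); state = (first_half, second_half,
  -- shuffled_deck); shuffled_deck starts as [] only as a placeholder: Pre_ guarantees the loop
  -- runs at least once (Python raises NameError when num_shuffles ≤ 0: shuffled_deck unbound).
  let st := (PySem.List.pyRange 0 num_shuffles 1).foldl
    (fun (st : List String × List String × List String) _ =>
      let shuffled := (st.1.zip st.2.1).foldl (fun acc p => acc ++ [p.1, p.2]) []
      (PySem.List.slice shuffled none (some (middle : Int)),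
       PySem.List.slice shuffled (some (middle : Int)) none,
       shuffled))
    (first_half, second_half, [])
  st.2.2

-- ===== PORT B =====
-- pow(2, num_shuffles, m) of Source B: binary modular exponentiation
-- (exact for exponent ≥ 0, which Pre_ guarantees).
def powMod (b e m : Nat) : Nat :=
  if e = 0 then 1 % m
  else
    let h := powMod b (e / 2) m
    if e % 2 = 0 then h * h % m else h * h % m * b % m
termination_by e
decreasing_by exact Nat.div_lt_self (Nat.pos_of_ne_zero (by assumption)) one_lt_two

def faro_shuffle_alt (deck : List String) (num_shuffles : Int) : List String :=
  let n : Nat := 2 * (deck.length / 2)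
  if n = 0 then []
  else
    let core := deck.take n              -- core = deck[:n]
    let m := n - 1
    let e := powMod 2 num_shuffles.toNat m
    -- out = [None] * n, the placeholder "" standing for None (every slot is overwritten)
    let out0 := List.replicate n ""
    let out := (List.range m).foldl (fun out i => out.set (i * e % m) (core.getD i "")) out0
    out.set m (core.getD m "")

-- ===== PRECONDITION & SPEC =====
-- Pre_ excludes num_shuffles ≤ 0, on which Python A raises NameError (shuffled_deck unbound).
def Pre_faro_shuffle (deck : List String) (num_shuffles : Int) : Prop := 1 ≤ num_shuffles
instance (deck : List String) (num_shuffles : Int) : Decidable (Pre_faro_shuffle deck num_shuffles) := by unfold Pre_faro_shuffle; infer_instance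

def pvWitness_faro_shuffle : List String × Int := (["A", "B", "C", "D", "E", "F"], 2)

def Spec_faro_shuffle (deck : List String) (num_shuffles : Int) (out : List String) : Prop := out = faro_shuffle_alt deck num_shuffles
instance (deck : List String) (num_shuffles : Int) (out : List String) : Decidable (Spec_faro_shuffle deck num_shuffles out) := by unfold Spec_faro_shuffle; infer_instance

-- ===== CLAIM (what is proved, stated in full; the proofs are below) =====
def Claim_equal_faro_shuffle : Prop := ∀ (deck : List String) (num_shuffles : Int), Dom_faro_shuffle deck num_shuffles → Pre_faro_shuffle deck num_shuffles → Spec_faro_shuffle deck num_shuffles (faro_shuffle deck num_shuffles)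

-- ===== LEMMAS AND PROOFS =====

theorem powMod_eq (b e m : Nat) : powMod b e m = b ^ e % m := by
  by_cases h0 : e = 0
  · subst h0; rw [powMod]; simp
  · have ihe := powMod_eq b (e / 2) m
    rw [powMod, if_neg h0]
    show (if e % 2 = 0 then powMod b (e / 2) m * powMod b (e / 2) m % m
          else powMod b (e / 2) m * powMod b (e / 2) m % m * b % m) = b ^ e % m
    rw [ihe]
    have hmm : (b ^ (e / 2) % m) ≡ b ^ (e / 2) [MOD m] := Nat.mod_modEq _ m
    have c1 : (b ^ (e / 2) % m) * (b ^ (e / 2) % m) ≡ b ^ (e / 2) * b ^ (e / 2) [MOD m] :=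
      hmm.mul hmm
    by_cases h2 : e % 2 = 0
    · rw [if_pos h2]
      have key : b ^ (e / 2) * b ^ (e / 2) = b ^ e := by
        rw [← pow_add]; congr 1; omega
      exact c1.trans (by rw [key])
    · rw [if_neg h2]
      have key : b ^ (e / 2) * b ^ (e / 2) * b = b ^ e := by
        rw [← pow_add, ← pow_succ]; congr 1; omega
      exact (((Nat.mod_modEq ((b ^ (e / 2) % m) * (b ^ (e / 2) % m)) m).trans c1).mul_right b).trans
        (by rw [key])
termination_by e
decreasing_by exact Nat.div_lt_self (Nat.pos_of_ne_zero h0) one_lt_two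

-- index map of j faro shuffles on a deck of length 2*m0: output position r takes the card at
-- input position (idxMap m0 (m0^j) r)
def idxMap (m0 t r : Nat) : Nat := if r = 2 * m0 - 1 then r else r * t % (2 * m0 - 1)

def permBy (c : List String) (m0 t : Nat) : List String :=
  (List.range (2 * m0)).map (fun r => c.getD (idxMap m0 t r) "")

-- the loop body of A as a function of the loop state
def faroStep (m0 : Nat) (st : List String × List String × List String) :
    List String × List String × List String :=
  let shuffled := (st.1.zip st.2.1).foldl (fun acc p => acc ++ [p.1, p.2]) []
  (PySem.List.slice shuffled none (some (m0 : Int)),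
   PySem.List.slice shuffled (some (m0 : Int)) none,
   shuffled)

theorem foldl_const {α β : Type} (F : α → α) (l : List β) (init : α) :
    l.foldl (fun a _ => F a) init = F^[l.length] init := by
  induction l generalizing init with
  | nil => rfl
  | cons x xs ih =>
    rw [List.foldl_cons, List.length_cons, Function.iterate_succ_apply]
    exact ih (F init)

-- interleaving of two lists, as A's inner loop builds it
def il : List String → List String → List String
  | x :: xs, y :: ys => x :: y :: il xs ys
  | _, _ => []

theorem zip_flatMap_il : ∀ (xs ys : List String),
    (xs.zip ys).flatMap (fun p => [p.1, p.2]) = il xs ys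
  | [], ys => by cases ys <;> simp [il]
  | x :: xs, [] => by simp [il]
  | x :: xs, y :: ys => by
    rw [List.zip_cons_cons, List.flatMap_cons, zip_flatMap_il xs ys]
    simp [il]

theorem il_getElem? : ∀ (xs ys : List String), xs.length ≤ ys.length → ∀ (r : Nat),
    (il xs ys)[r]? =
      if r / 2 < xs.length then (if r % 2 = 0 then xs[r / 2]? else ys[r / 2]?) else none
  | [], ys, h, r => by simp [il]
  | x :: xs, [], h, r => by simp at h
  | x :: xs, y :: ys, h, r => by
    match r with
    | 0 => simp [il]
    | 1 => norm_num [il]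
    | (r + 2) =>
      have h' : xs.length ≤ ys.length := by simpa using h
      have ih := il_getElem? xs ys h' r
      show (x :: y :: il xs ys)[r + 2]? = _
      rw [List.getElem?_cons_succ, List.getElem?_cons_succ, ih]
      have e1 : (r + 2) / 2 = r / 2 + 1 := by omega
      have e2 : (r + 2) % 2 = r % 2 := by omega
      rw [e1, e2]
      by_cases hlt : r / 2 < xs.length
      · rw [if_pos hlt, if_pos (show r / 2 + 1 < (x :: xs).length from by simp; omega)]
        by_cases hp : r % 2 = 0
        · rw [if_pos hp, if_pos hp, List.getElem?_cons_succ]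
        · rw [if_neg hp, if_neg hp, List.getElem?_cons_succ]
      · rw [if_neg hlt, if_neg (show ¬ r / 2 + 1 < (x :: xs).length from by simp; omega)]

theorem idxMap_lt (m0 t r : Nat) (h1 : 1 ≤ m0) (hr : r < 2 * m0) : idxMap m0 t r < 2 * m0 := by
  unfold idxMap
  split_ifs with h
  · omega
  · have := Nat.mod_lt (r * t) (show 0 < 2 * m0 - 1 by omega)
    omega

theorem permBy_getElem? (c : List String) (m0 t : Nat) (h1 : 1 ≤ m0) (hc : 2 * m0 ≤ c.length)
    (r : Nat) :
    (permBy c m0 t)[r]? = if r < 2 * m0 then getElem? c (idxMap m0 t r) else none := by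
  unfold permBy
  rw [List.getElem?_map]
  by_cases hr : r < 2 * m0
  · rw [List.getElem?_range hr, if_pos hr]
    have hlt : idxMap m0 t r < c.length := lt_of_lt_of_le (idxMap_lt m0 t r h1 hr) hc
    rw [List.getElem?_eq_getElem hlt]
    simp [List.getElem?_eq_getElem hlt]
  · rw [List.getElem?_eq_none (by simpa using hr), if_neg hr]
    simp

theorem idxMap_comp (m0 s t r : Nat) (h1 : 1 ≤ m0) (hr : r < 2 * m0) :
    idxMap m0 t (idxMap m0 s r) = idxMap m0 (s * t) r := by
  unfold idxMap
  by_cases hR : r = 2 * m0 - 1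
  · simp [hR]
  · have hM : 0 < 2 * m0 - 1 := by omega
    have hlt : r * s % (2 * m0 - 1) < 2 * m0 - 1 := Nat.mod_lt _ hM
    rw [if_neg hR, if_neg (by omega), if_neg hR, Nat.mod_mul_mod, mul_assoc]

theorem permBy_comp (c : List String) (m0 s t : Nat) (h1 : 1 ≤ m0) :
    permBy (permBy c m0 t) m0 s = permBy c m0 (s * t) := by
  unfold permBy
  apply List.map_congr_left
  intro r hr
  rw [List.mem_range] at hr
  rw [← idxMap_comp m0 s t r h1 hr]
  have hlt := idxMap_lt m0 s r h1 hr
  rw [List.getD_eq_getElem?_getD, List.getElem?_map, List.getElem?_range hlt]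
  simp [List.getD_eq_getElem?_getD]

theorem step_eq (d : List String) (m0 : Nat) (hm : d.length / 2 = m0) (h1 : 1 ≤ m0) :
    ((d.take m0).zip (d.drop m0)).flatMap (fun p => [p.1, p.2]) =
      permBy (d.take (2 * m0)) m0 m0 := by
  have hdl : 2 * m0 ≤ d.length := by omega
  have hxl : (d.take m0).length = m0 := by rw [List.length_take]; omega
  rw [zip_flatMap_il]
  apply List.ext_getElem?
  intro r
  rw [il_getElem? _ _ (by rw [hxl, List.length_drop]; omega) r, hxl,
      permBy_getElem? _ _ _ h1 (by rw [List.length_take]; omega) r]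
  by_cases hr : r < 2 * m0
  · rw [if_pos hr, if_pos (by omega : r / 2 < m0)]
    simp only [List.getElem?_take, List.getElem?_drop]
    rw [if_pos (idxMap_lt m0 m0 r h1 hr)]
    by_cases hp : r % 2 = 0
    · rw [if_pos hp, if_pos (by omega : r / 2 < m0)]
      have hidx : idxMap m0 m0 r = r / 2 := by
        unfold idxMap
        rw [if_neg (show r ≠ 2 * m0 - 1 by omega)]
        obtain ⟨t, rfl⟩ : ∃ t, r = 2 * t := ⟨r / 2, by omega⟩
        obtain ⟨m1, rfl⟩ : ∃ m1, m0 = m1 + 1 := ⟨m0 - 1, by omega⟩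
        have h4 : 2 * t / 2 = t := by omega
        rw [h4]
        have key : 2 * t * (m1 + 1) = t + t * (2 * (m1 + 1) - 1) := by
          have h5 : 2 * (m1 + 1) - 1 = 2 * m1 + 1 := by omega
          rw [h5]; ring
        rw [key, Nat.add_mul_mod_self_right]
        exact Nat.mod_eq_of_lt (by omega)
      rw [hidx]
    · rw [if_neg hp]
      have hidx : idxMap m0 m0 r = m0 + r / 2 := by
        unfold idxMap
        by_cases hlast : r = 2 * m0 - 1
        · rw [if_pos hlast]; omega
        · rw [if_neg hlast]
          obtain ⟨t, rfl⟩ : ∃ t, r = 2 * t + 1 := ⟨r / 2, by omega⟩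
          obtain ⟨m1, rfl⟩ : ∃ m1, m0 = m1 + 1 := ⟨m0 - 1, by omega⟩
          have h4 : (2 * t + 1) / 2 = t := by omega
          rw [h4]
          have key : (2 * t + 1) * (m1 + 1) = (m1 + 1 + t) + t * (2 * (m1 + 1) - 1) := by
            have h5 : 2 * (m1 + 1) - 1 = 2 * m1 + 1 := by omega
            rw [h5]; ring
          rw [key, Nat.add_mul_mod_self_right]
          exact Nat.mod_eq_of_lt (by omega)
      rw [hidx]
  · rw [if_neg hr, if_neg (by omega : ¬ r / 2 < m0)]

theorem faroStep_eq (m0 : Nat) (st : List String × List String × List String) :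
    faroStep m0 st = (((st.1.zip st.2.1).flatMap (fun p => [p.1, p.2])).take m0,
                      ((st.1.zip st.2.1).flatMap (fun p => [p.1, p.2])).drop m0,
                      (st.1.zip st.2.1).flatMap (fun p => [p.1, p.2])) := by
  simp only [faroStep, PySem.List.foldl_append_eq_flatMap, List.nil_append,
             PySem.List.slice_to_natCast, PySem.List.slice_from_natCast]

theorem A_inv (d : List String) (m0 : Nat) (hm : d.length / 2 = m0) (h1 : 1 ≤ m0) (j : Nat) :
    (faroStep m0)^[j + 1] (d.take m0, d.drop m0, []) =
      ((permBy (d.take (2 * m0)) m0 (m0 ^ (j + 1))).take m0,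
       (permBy (d.take (2 * m0)) m0 (m0 ^ (j + 1))).drop m0,
       permBy (d.take (2 * m0)) m0 (m0 ^ (j + 1))) := by
  induction j with
  | zero =>
    simp only [zero_add, Function.iterate_one, pow_one]
    rw [faroStep_eq]
    dsimp only
    rw [step_eq d m0 hm h1]
  | succ j ih =>
    rw [Function.iterate_succ_apply', ih, faroStep_eq]
    dsimp only
    have hS : (permBy (d.take (2 * m0)) m0 (m0 ^ (j + 1))).length = 2 * m0 := by
      simp [permBy]
    rw [step_eq (permBy (d.take (2 * m0)) m0 (m0 ^ (j + 1))) m0 (by rw [hS]; omega) h1,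
        List.take_of_length_le (le_of_eq hS), permBy_comp _ _ _ _ h1, ← pow_succ']

theorem scatter_length (p : Nat → Nat) (v : Nat → String) :
    ∀ (is : List Nat) (l0 : List String),
      (is.foldl (fun l i => l.set (p i) (v i)) l0).length = l0.length := by
  intro is
  induction is with
  | nil => intro l0; rfl
  | cons a as ih => intro l0; rw [List.foldl_cons, ih, List.length_set]

theorem scatter_getD (M : Nat) (p q : Nat → Nat) (v : Nat → String)
    (hp : ∀ i, i < M → p i < M)
    (hqp : ∀ i, i < M → q (p i) = i)
    (hpq : ∀ j, j < M → p (q j) = j) :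
    ∀ (N : Nat), N ≤ M → ∀ (l0 : List String), M < l0.length → ∀ (j : Nat), j < l0.length →
      ((List.range N).foldl (fun l i => l.set (p i) (v i)) l0).getD j "" =
        if j < M ∧ q j < N then v (q j) else l0.getD j "" := by
  intro N
  induction N with
  | zero => intro _ l0 _ j _; simp
  | succ N ih =>
    intro hN l0 hl j hj
    rw [List.range_succ, List.foldl_append, List.foldl_cons, List.foldl_nil]
    have hplen : ((List.range N).foldl (fun l i => l.set (p i) (v i)) l0).length = l0.length :=
      scatter_length p v _ l0
    have hNM : N < M := by omega
    by_cases hjp : j = p N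
    · subst hjp
      have hpN : p N < M := hp N hNM
      rw [List.getD_eq_getElem?_getD, List.getElem?_set_self (by rw [hplen]; omega)]
      rw [if_pos ⟨hpN, by rw [hqp N hNM]; omega⟩, hqp N hNM]
      rfl
    · rw [List.getD_eq_getElem?_getD, List.getElem?_set_ne (fun h => hjp h.symm),
          ← List.getD_eq_getElem?_getD, ih (by omega) l0 hl j hj]
      by_cases hjM : j < M
      · have hqj : q j ≠ N := fun h => hjp (by rw [← hpq j hjM, h])
        have hiff : (j < M ∧ q j < N + 1) ↔ (j < M ∧ q j < N) := by
          constructor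
          · rintro ⟨a, b⟩; exact ⟨a, by omega⟩
          · rintro ⟨a, b⟩; exact ⟨a, by omega⟩
        exact (if_congr hiff rfl rfl).symm
      · rw [if_neg (fun h => hjM h.1), if_neg (fun h => hjM h.1)]

theorem modinv (M a b j : Nat) (hM : 0 < M) (hab : a * b ≡ 1 [MOD M]) (hj : j < M) :
    (j * a % M) * b % M = j := by
  have e2 : (j * a % M) * b ≡ (j * a) * b [MOD M] := (Nat.mod_modEq (j * a) M).mul_right b
  have e3 : (j * a) * b = j * (a * b) := by ring
  have e5 : (j * a % M) * b ≡ j * 1 [MOD M] := e2.trans (by rw [e3]; exact hab.mul_left j)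
  calc (j * a % M) * b % M = (j * 1) % M := e5
    _ = j := by rw [mul_one, Nat.mod_eq_of_lt hj]

theorem B_eq (deck : List String) (ns : Int) (h1 : 1 ≤ deck.length / 2) :
    faro_shuffle_alt deck ns =
      permBy (deck.take (2 * (deck.length / 2))) (deck.length / 2)
        ((deck.length / 2) ^ ns.toNat) := by
  simp only [faro_shuffle_alt]
  rw [if_neg (by omega), powMod_eq]
  have hM : 0 < 2 * (deck.length / 2) - 1 := by omega
  have hcorelen : (deck.take (2 * (deck.length / 2))).length = 2 * (deck.length / 2) := by
    rw [List.length_take]; omega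
  have base : (2 * (deck.length / 2)) ≡ 1 [MOD 2 * (deck.length / 2) - 1] := by
    have h7 : ((2 * (deck.length / 2) - 1) + 1) ≡ 1 [MOD 2 * (deck.length / 2) - 1] := by
      show ((2 * (deck.length / 2) - 1) + 1) % (2 * (deck.length / 2) - 1)
          = 1 % (2 * (deck.length / 2) - 1)
      exact Nat.add_mod_left _ _
    rwa [show (2 * (deck.length / 2) - 1) + 1 = 2 * (deck.length / 2) from by omega] at h7
  have hpow : (2 : Nat) ^ ns.toNat * (deck.length / 2) ^ ns.toNat ≡ 1
      [MOD 2 * (deck.length / 2) - 1] := by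
    have h6 := base.pow ns.toNat
    rw [one_pow] at h6
    rw [← mul_pow]
    exact h6
  have pairL : (2 ^ ns.toNat % (2 * (deck.length / 2) - 1)) * (deck.length / 2) ^ ns.toNat ≡ 1
      [MOD 2 * (deck.length / 2) - 1] := ((Nat.mod_modEq _ _).mul_right _).trans hpow
  have pairR : (deck.length / 2) ^ ns.toNat * (2 ^ ns.toNat % (2 * (deck.length / 2) - 1)) ≡ 1
      [MOD 2 * (deck.length / 2) - 1] :=
    ((Nat.mod_modEq _ _).mul_left _).trans
      (by rw [mul_comm ((deck.length / 2) ^ ns.toNat) (2 ^ ns.toNat)]; exact hpow)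
  have hp : ∀ i, i < 2 * (deck.length / 2) - 1 →
      i * (2 ^ ns.toNat % (2 * (deck.length / 2) - 1)) % (2 * (deck.length / 2) - 1) <
        2 * (deck.length / 2) - 1 := fun i _ => Nat.mod_lt _ hM
  have hqp : ∀ i, i < 2 * (deck.length / 2) - 1 →
      (i * (2 ^ ns.toNat % (2 * (deck.length / 2) - 1)) % (2 * (deck.length / 2) - 1)) *
        (deck.length / 2) ^ ns.toNat % (2 * (deck.length / 2) - 1) = i :=
    fun i hi => modinv _ _ _ _ hM pairL hi
  have hpq : ∀ j, j < 2 * (deck.length / 2) - 1 →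
      (j * (deck.length / 2) ^ ns.toNat % (2 * (deck.length / 2) - 1)) *
        (2 ^ ns.toNat % (2 * (deck.length / 2) - 1)) % (2 * (deck.length / 2) - 1) = j :=
    fun j hj => modinv _ _ _ _ hM pairR hj
  have hfoldlen : ((List.range (2 * (deck.length / 2) - 1)).foldl
      (fun l i => l.set (i * (2 ^ ns.toNat % (2 * (deck.length / 2) - 1)) %
        (2 * (deck.length / 2) - 1)) ((deck.take (2 * (deck.length / 2))).getD i ""))
      (List.replicate (2 * (deck.length / 2)) "")).length = 2 * (deck.length / 2) := by
    rw [scatter_length]; simp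
  apply List.ext_getElem?
  intro r
  rw [permBy_getElem? _ _ _ (by omega) (by rw [hcorelen]) r]
  by_cases hr : r < 2 * (deck.length / 2)
  · by_cases hrM : r = 2 * (deck.length / 2) - 1
    · subst hrM
      rw [if_pos (by omega), List.getElem?_set_self (by rw [hfoldlen]; omega)]
      have hidx : idxMap (deck.length / 2) ((deck.length / 2) ^ ns.toNat)
          (2 * (deck.length / 2) - 1) = 2 * (deck.length / 2) - 1 := by
        unfold idxMap; rw [if_pos rfl]
      rw [hidx, List.getElem?_eq_getElem (by rw [hcorelen]; omega),
          List.getD_eq_getElem _ "" (by rw [hcorelen]; omega)]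
    · rw [if_pos hr, List.getElem?_set_ne (fun h => hrM h.symm),
          List.getElem?_eq_getElem (by rw [hfoldlen]; omega),
          ← List.getD_eq_getElem _ "" (by rw [hfoldlen]; omega)]
      have hs := scatter_getD (2 * (deck.length / 2) - 1)
        (fun i => i * (2 ^ ns.toNat % (2 * (deck.length / 2) - 1)) % (2 * (deck.length / 2) - 1))
        (fun j => j * (deck.length / 2) ^ ns.toNat % (2 * (deck.length / 2) - 1))
        (fun i => (deck.take (2 * (deck.length / 2))).getD i "")
        hp hqp hpq
        (2 * (deck.length / 2) - 1) le_rfl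
        (List.replicate (2 * (deck.length / 2)) "") (by simp; omega)
        r (by simp; omega)
      simp only [] at hs
      rw [hs, if_pos ⟨by omega, Nat.mod_lt _ hM⟩]
      have hidx : idxMap (deck.length / 2) ((deck.length / 2) ^ ns.toNat) r =
          r * (deck.length / 2) ^ ns.toNat % (2 * (deck.length / 2) - 1) := by
        unfold idxMap; rw [if_neg hrM]
      have hlt2 : r * (deck.length / 2) ^ ns.toNat % (2 * (deck.length / 2) - 1) <
          (deck.take (2 * (deck.length / 2))).length := by
        rw [hcorelen]
        have := Nat.mod_lt (r * (deck.length / 2) ^ ns.toNat) hM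
        omega
      rw [hidx, List.getElem?_eq_getElem hlt2, List.getD_eq_getElem _ "" hlt2]
  · rw [if_neg hr, List.getElem?_eq_none (by rw [List.length_set, hfoldlen]; omega)]

-- ===== VERDICT (by name: the statement is the Claim_ definition above) =====
theorem faro_shuffle_spec : Claim_equal_faro_shuffle := by
  intro deck ns _ hpre
  have hns : (1 : Int) ≤ ns := hpre
  show faro_shuffle deck ns = faro_shuffle_alt deck ns
  have hfold : faro_shuffle deck ns =
      ((faroStep (deck.length / 2))^[(PySem.List.pyRange 0 ns 1).length]
        (PySem.List.slice deck none (some ((deck.length / 2 : Nat) : Int)),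
         PySem.List.slice deck (some ((deck.length / 2 : Nat) : Int)) none,
         ([] : List String))).2.2 := by
    show ((PySem.List.pyRange 0 ns 1).foldl (fun st _ => faroStep (deck.length / 2) st)
      (PySem.List.slice deck none (some ((deck.length / 2 : Nat) : Int)),
       PySem.List.slice deck (some ((deck.length / 2 : Nat) : Int)) none,
       ([] : List String))).2.2 = _
    rw [foldl_const]
  have hlen : (PySem.List.pyRange 0 ns 1).length = ns.toNat := by
    rw [PySem.List.pyRange_one]; simp
  rw [hfold, hlen, PySem.List.slice_to_natCast, PySem.List.slice_from_natCast]
  obtain ⟨j, hj⟩ : ∃ j, ns.toNat = j + 1 := ⟨ns.toNat - 1, by omega⟩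
  by_cases h1 : deck.length / 2 = 0
  · rw [h1]
    simp only [List.take_zero, List.drop_zero]
    rw [hj, Function.iterate_succ_apply]
    have hstep0 : faroStep 0 ([], deck, ([] : List String)) = ([], [], []) := rfl
    rw [hstep0]
    have hfix : ∀ i, (faroStep 0)^[i]
        (([] : List String), ([] : List String), ([] : List String)) = ([], [], []) := by
      intro i
      induction i with
      | zero => rfl
      | succ i ih => rw [Function.iterate_succ_apply, show faroStep 0
          (([] : List String), ([] : List String), ([] : List String)) = ([], [], []) from rfl, ih]
    rw [hfix]
    simp only [faro_shuffle_alt]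
    rw [if_pos (by omega)]
  · have h1' : 1 ≤ deck.length / 2 := by omega
    rw [hj, A_inv deck (deck.length / 2) rfl h1' j]
    dsimp only
    rw [B_eq deck ns h1', hj]
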